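-- pv_equiv track=rewrite | github.com/pypi-data/pypi-mirror-392 | packages/nlp2mcp/nlp2mcp-0.7.0.tar.gz/nlp2mcp-0.7.0/src/ir/preprocessor.py | _has_statement_ending_semicolon
-- ===== SOURCE A (Python) =====
-- def _has_statement_ending_semicolon(line: str) -> bool:
--     """Check if a line has a semicolon that ends a statement (not in string/comment).
--
--     This handles:
--     - Semicolons inside single or double quoted strings are ignored
--     - Escaped quotes within strings (e.g., "test\\"quote" or 'test\\'quote')
--     - Semicolons after GAMS inline comments (*) are ignored
--
--     Note: This doesn't handle nested quotes, but works for typical GAMS code.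
--     """
--     in_string = None
--     i = 0
--     while i < len(line):
--         c = line[i]
--
--         # Handle string state
--         if in_string:
--             if c == in_string:
--                 # Check if the quote is escaped by counting preceding backslashes
--                 # An odd number of backslashes means the quote is escaped
--                 backslash_count = 0
--                 j = i - 1
--                 while j >= 0 and line[j] == "\\":
--                     backslash_count += 1
--                     j -= 1
--                 if backslash_count % 2 == 1:
--                     # Quote is escaped, stay in string
--                     i += 1
--                     continue
--                 in_string = None
--             i += 1
--             continue
--
--         # Check for comment start (inline comment with *)
--         if c == "*":
--             # GAMS inline comments start with * and go to end of line
--             return False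
--
--         # Check for string start
--         if c in ('"', "'"):
--             in_string = c
--             i += 1
--             continue
--
--         # Check for semicolon outside string/comment
--         if c == ";":
--             return True
--
--         i += 1
--
--     return False
-- ===== SOURCE B (Python) =====
-- def _close_quote(line, i, q):
--     """Return index just past the unescaped closing quote q, scanning from i
--     (or len(line) if the string literal is unterminated)."""
--     n = len(line)
--     while i < n:
--         if line[i] == q:
--             k = i
--             while k > 0 and line[k - 1] == "\\":
--                 k -= 1
--             if (i - k) % 2 == 0:
--                 return i + 1
--         i += 1
--     return n
--
--
-- def _mask_strings(line):
--     """Replace every quoted string literal (including its quotes) by one space."""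
--     out = []
--     i = 0
--     n = len(line)
--     while i < n:
--         c = line[i]
--         if c == '"' or c == "'":
--             i = _close_quote(line, i + 1, c)
--             out.append(" ")
--         else:
--             out.append(c)
--             i += 1
--     return "".join(out)
--
--
-- def _has_statement_ending_semicolon(line: str) -> bool:
--     for c in _mask_strings(line):
--         if c == "*":
--             return False
--         if c == ";":
--             return True
--     return False
-- ===== Notes on version B (the rewrite author's own statement) =====
-- stated objective: alternative
-- what changed: A interleaves an in_string state machine with the search; B first masks every quoted string literal out of the line (each literal becomes one space, using a separate close-quote helper with the same escape/unterminated semantics) and then does a plain first-';'-vs-'*' scan over the masked text.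
import Mathlib
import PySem

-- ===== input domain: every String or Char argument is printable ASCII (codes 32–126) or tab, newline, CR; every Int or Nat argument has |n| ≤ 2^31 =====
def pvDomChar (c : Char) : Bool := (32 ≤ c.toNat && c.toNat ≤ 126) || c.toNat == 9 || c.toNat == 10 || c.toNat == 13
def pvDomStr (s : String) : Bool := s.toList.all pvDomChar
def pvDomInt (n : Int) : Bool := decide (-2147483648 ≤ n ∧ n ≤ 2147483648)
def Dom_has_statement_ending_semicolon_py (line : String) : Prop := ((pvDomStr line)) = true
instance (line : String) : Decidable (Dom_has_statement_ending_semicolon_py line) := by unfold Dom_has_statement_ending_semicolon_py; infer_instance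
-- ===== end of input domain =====

-- B replaces A's interleaved in_string state machine by two phases: mask out every
-- quoted string literal first, then a plain first-';'-vs-'*' scan (alternative, same cost).

-- ===== PORT A =====
-- A's inner backslash-counting loop: count of consecutive '\' at indices j-1, j-2, …
def pvCountBS (cs : List Char) : Nat → Nat
  | 0 => 0
  | k + 1 => if cs[k]? == some '\\' then pvCountBS cs k + 1 else 0

-- A's main while loop: index i, in_string state
def pvGoA (cs : List Char) (inStr : Option Char) (i : Nat) : Bool :=
  if h : i < cs.length then
    let c := cs[i]
    match inStr with
    | some q =>
      if c == q then
        if pvCountBS cs i % 2 == 1 then pvGoA cs (some q) (i + 1)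
        else pvGoA cs none (i + 1)
      else pvGoA cs (some q) (i + 1)
    | none =>
      if c == '*' then false
      else if c == '"' || c == '\'' then pvGoA cs (some c) (i + 1)
      else if c == ';' then true
      else pvGoA cs none (i + 1)
  else false
termination_by cs.length - i

def has_statement_ending_semicolon_py (line : String) : Bool :=
  pvGoA line.toList none 0

-- ===== PORT B =====
-- Source B's inner loop in _close_quote: k walks back over backslashes, returns final k
def pvBackRun (cs : List Char) : Nat → Nat
  | 0 => 0
  | k + 1 => if cs[k]? == some '\\' then pvBackRun cs k else k + 1

-- index just past the unescaped closing quote q (or cs.length if unterminated)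
def pvCloseQuote (cs : List Char) (i : Nat) (q : Char) : Nat :=
  if h : i < cs.length then
    if cs[i] == q then
      if (i - pvBackRun cs i) % 2 == 0 then i + 1
      else pvCloseQuote cs (i + 1) q
    else pvCloseQuote cs (i + 1) q
  else cs.length
termination_by cs.length - i

theorem pvCloseQuote_ge (cs : List Char) (q : Char) :
    ∀ k j, cs.length - j ≤ k → j ≤ cs.length → j ≤ pvCloseQuote cs j q := by
  intro k
  induction k with
  | zero =>
    intro j hk hj
    rw [pvCloseQuote]
    split
    · omega
    · omega
  | succ k ih =>
    intro j hk hj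
    rw [pvCloseQuote]
    split
    · rename_i hlt
      split
      · split
        · omega
        · have := ih (j + 1) (by omega) (by omega); omega
      · have := ih (j + 1) (by omega) (by omega); omega
    · omega

-- mask strings: each quoted literal (with its quotes) becomes one space
def pvMask (cs : List Char) (i : Nat) : List Char :=
  if h : i < cs.length then
    let c := cs[i]
    if c == '"' || c == '\'' then ' ' :: pvMask cs (pvCloseQuote cs (i + 1) c)
    else c :: pvMask cs (i + 1)
  else []
termination_by cs.length - i
decreasing_by
  · have := pvCloseQuote_ge cs cs[i] (cs.length - (i + 1)) (i + 1) (le_refl _) (by omega); omega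
  · omega

def pvScan : List Char → Bool
  | [] => false
  | c :: rest => if c == '*' then false else if c == ';' then true else pvScan rest

def has_statement_ending_semicolon_py_alt (line : String) : Bool :=
  pvScan (pvMask line.toList 0)

-- ===== PRECONDITION & SPEC =====
def Spec_has_statement_ending_semicolon_py (line : String) (out : Bool) : Prop := out = has_statement_ending_semicolon_py_alt line
instance (line : String) (out : Bool) : Decidable (Spec_has_statement_ending_semicolon_py line out) := by unfold Spec_has_statement_ending_semicolon_py; infer_instance

-- ===== CLAIM (what is proved, stated in full; the proofs are below) =====
def Claim_equal_has_statement_ending_semicolon_py : Prop := ∀ (line : String), Dom_has_statement_ending_semicolon_py line → Spec_has_statement_ending_semicolon_py line (has_statement_ending_semicolon_py line)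

-- ===== LEMMAS AND PROOFS =====

-- the two backslash-run computations agree: i - pvBackRun = pvCountBS, with pvBackRun ≤ i
theorem pvBackRun_add (cs : List Char) (i : Nat) :
    pvBackRun cs i + pvCountBS cs i = i := by
  induction i with
  | zero => simp [pvBackRun, pvCountBS]
  | succ k ih =>
    simp only [pvBackRun, pvCountBS]
    split <;> omega

-- one step of the not-in-string case of A's loop, for readability of the proofs below
theorem pvGoA_stop (cs : List Char) (st : Option Char) (i : Nat) (h : ¬ i < cs.length) :
    pvGoA cs st i = false := by
  rw [pvGoA, dif_neg h]

-- A's while loop inside a q-string starting at j equals A restarted (out of string) just past the close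
theorem pvGoA_string (cs : List Char) (q : Char) :
    ∀ k j, cs.length - j ≤ k → pvGoA cs (some q) j = pvGoA cs none (pvCloseQuote cs j q) := by
  intro k
  induction k with
  | zero =>
    intro j hk
    have hj : ¬ j < cs.length := by omega
    rw [pvCloseQuote, dif_neg hj, pvGoA_stop cs (some q) j hj,
        pvGoA_stop cs none cs.length (by omega)]
  | succ k ih =>
    intro j hk
    by_cases hj : j < cs.length
    · have hbs : j - pvBackRun cs j = pvCountBS cs j := by
        have := pvBackRun_add cs j; omega
      by_cases hq : (cs[j] == q) = true
      · by_cases hp : pvCountBS cs j % 2 = 1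
        · have hC : pvCloseQuote cs j q = pvCloseQuote cs (j + 1) q := by
            rw [pvCloseQuote, dif_pos hj, if_pos hq, if_neg (by simp; omega)]
          rw [hC]
          conv_lhs => rw [pvGoA]
          rw [dif_pos hj]
          simp only [hq, if_true]
          rw [if_pos (by simpa using hp)]
          exact ih (j + 1) (by omega)
        · have hC : pvCloseQuote cs j q = j + 1 := by
            rw [pvCloseQuote, dif_pos hj, if_pos hq, if_pos (by simp; omega)]
          rw [hC]
          conv_lhs => rw [pvGoA]
          simp only [dif_pos hj, hq, if_true]
          rw [if_neg (by simpa using hp)]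
      · have hC : pvCloseQuote cs j q = pvCloseQuote cs (j + 1) q := by
          rw [pvCloseQuote, dif_pos hj, if_neg hq]
        rw [hC]
        conv_lhs => rw [pvGoA]
        simp only [dif_pos hj, hq]
        exact ih (j + 1) (by omega)
    · have hC : pvCloseQuote cs j q = cs.length := by rw [pvCloseQuote, dif_neg hj]
      rw [hC, pvGoA_stop cs (some q) j hj, pvGoA_stop cs none cs.length (by omega)]

-- main: A's loop outside strings equals scanning the masked suffix
theorem pvGoA_mask_fuel (cs : List Char) :
    ∀ k i, cs.length - i ≤ k → pvGoA cs none i = pvScan (pvMask cs i) := by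
  intro k
  induction k with
  | zero =>
    intro i hk
    have hi : ¬ i < cs.length := by omega
    rw [pvGoA_stop cs none i hi, pvMask, dif_neg hi]
    rfl
  | succ k ih =>
    intro i hk
    by_cases hi : i < cs.length
    · by_cases hquote : (cs[i] == '"' || cs[i] == '\'') = true
      · -- string literal: skip via pvCloseQuote / masked to a space
        have hstar : ¬ (cs[i] == '*') = true := by
          rcases Bool.or_eq_true_iff.mp hquote with h | h <;> simp_all
        conv_lhs => rw [pvGoA]
        rw [dif_pos hi]
        simp only [hstar, hquote, if_true]
        rw [pvMask, dif_pos hi]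
        simp only [hquote, if_true]
        have hge := pvCloseQuote_ge cs cs[i] (cs.length - (i + 1)) (i + 1) (le_refl _) (by omega)
        rw [pvGoA_string cs cs[i] (cs.length - (i + 1)) (i + 1) (le_refl _)]
        rw [ih (pvCloseQuote cs (i + 1) cs[i]) (by omega)]
        simp [pvScan]
      · conv_lhs => rw [pvGoA]
        rw [dif_pos hi]
        simp only [hquote]
        rw [pvMask, dif_pos hi]
        simp only [hquote]
        simp only [Bool.false_eq_true, if_false]
        have hsc : pvScan (cs[i] :: pvMask cs (i + 1)) =
            if cs[i] == '*' then false else if cs[i] == ';' then true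
            else pvScan (pvMask cs (i + 1)) := rfl
        rw [hsc]
        by_cases hstar : (cs[i] == '*') = true
        · simp only [hstar, if_true]
        · simp only [hstar]
          by_cases hsemi : (cs[i] == ';') = true
          · simp only [hsemi, if_true]
          · simp only [hsemi]
            exact ih (i + 1) (by omega)
    · have hi' : ¬ i < cs.length := hi
      rw [pvGoA_stop cs none i hi', pvMask, dif_neg hi']
      rfl

-- ===== VERDICT (by name: the statement is the Claim_ definition above) =====
theorem has_statement_ending_semicolon_py_spec : Claim_equal_has_statement_ending_semicolon_py := by
  intro line _
  unfold Spec_has_statement_ending_semicolon_py has_statement_ending_semicolon_py has_statement_ending_semicolon_py_alt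
  exact pvGoA_mask_fuel line.toList line.toList.length 0 (by omega)
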